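-- pv_equiv track=rewrite | github.com/LxMLearners/ClusTric | src/triclustering/preprocessing/als_preprocess.py | compute_consecutive_snapshots_n
-- ===== SOURCE A (Python) =====
-- def compute_consecutive_snapshots_n(data, n, label, yes_label='Y'):
--     """
--
--     Parameters
--     ----------
--     data: is a dict with ALS data with the format returned by `df_to_dict`
--     n: is the number of consecutive snapshots to consider, ie. the size of snapshots set
--         the size of snapshots set could be defined
--     label: is the target problem
--     strategy: (default) `flexible` - sets of snapshots have a maximum size `n`
--                 `strict` - sets of snapshots have a strict size of `n`
--
--     """
--
--     final = dict()
--     for (p, t) in data.items():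
--         if len(t.keys()) >= n:
--             fd = dict()
--             for (key, val) in t.items():
--                 fd[key] = val
--                 final[p] = fd
--
--     snaps = dict()
--     for (p, ts) in data.items():
--         for t in ts.keys():
--
--             size_t = len(ts.keys())
--             #size_n = min(n, size_t)
--             size_n = n
--             if t < size_t - (size_n-1) and all(map(lambda c: c != yes_label, [data[p][t+y][label] for y in range(0, size_n-1)])):
--                 if p not in snaps:
--                     snaps[p] = list()
--                 snaps[p].append([(t+j, data[p][t+j][label])
--                                 for j in range(0, size_n)])
--     return snaps
-- ===== SOURCE B (Python) =====
-- def compute_consecutive_snapshots_n(data, n, label, yes_label='Y'):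
--     snaps = {}
--     for p, ts in data.items():
--         T = len(ts)
--         # run[t]: length of the chain of consecutive keys t, t+1, ... whose label differs from yes_label
--         run = {}
--         for t in sorted(ts, reverse=True):
--             run[t] = 0 if ts[t].get(label) == yes_label else 1 + run.get(t + 1, 0)
--         res = []
--         for t in ts:
--             if t < T - (n - 1) and run[t] >= n - 1:
--                 res.append([(t + j, ts[t + j][label]) for j in range(n)])
--         if res:
--             snaps[p] = res
--     return snaps
-- ===== Notes on version B (the rewrite author's own statement) =====
-- stated objective: alternative
-- what changed: B makes one descending-key pass per patient computing, for every snapshot key, the run length of consecutive keys whose label differs from yes_label, and checks each candidate window with a single comparison against that precomputed run length, instead of A's per-start rescan of the next n-1 snapshots through three nested dict lookups; B also drops the dead `final` dict A builds and never reads. It trades A's repeated window scans for a sort of the keys plus a run-length table.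
import Mathlib
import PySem

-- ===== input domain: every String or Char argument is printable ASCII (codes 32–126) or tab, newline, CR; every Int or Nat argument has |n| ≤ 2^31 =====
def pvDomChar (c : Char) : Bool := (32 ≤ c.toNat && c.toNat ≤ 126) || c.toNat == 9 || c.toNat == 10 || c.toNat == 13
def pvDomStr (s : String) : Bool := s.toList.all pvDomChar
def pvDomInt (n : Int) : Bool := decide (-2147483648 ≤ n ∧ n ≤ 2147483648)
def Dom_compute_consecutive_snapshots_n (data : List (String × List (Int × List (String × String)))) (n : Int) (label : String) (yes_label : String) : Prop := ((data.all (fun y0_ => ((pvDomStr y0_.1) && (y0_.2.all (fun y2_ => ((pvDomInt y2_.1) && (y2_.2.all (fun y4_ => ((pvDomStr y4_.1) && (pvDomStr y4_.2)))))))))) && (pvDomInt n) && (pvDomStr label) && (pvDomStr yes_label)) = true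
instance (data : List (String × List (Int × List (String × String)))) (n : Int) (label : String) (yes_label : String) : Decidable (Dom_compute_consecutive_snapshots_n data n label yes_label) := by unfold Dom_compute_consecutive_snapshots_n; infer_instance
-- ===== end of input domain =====

-- B replaces A's per-start rescan of the next n-1 labels (three nested dict lookups each) by one
-- descending-key pass that computes the run length of consecutive good keys at every key and checks
-- each window against that precomputed table; objective: alternative algorithm, same proven values.

-- ===== PORT A =====
-- data[p][i][label] exactly as A writes it (dicts are association lists; getD is total — Pre_ keeps every lookup A performs on an existing key)
def lookL (data : List (String × List (Int × List (String × String)))) (p : String) (i : Int) (label : String) : String :=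
  PySem.Dict.getD (PySem.Dict.mk (PySem.Dict.getD (PySem.Dict.mk (PySem.Dict.getD (PySem.Dict.mk data) p [])) i [])) label ""

def compute_consecutive_snapshots_n (data : List (String × List (Int × List (String × String)))) (n : Int) (label : String) (yes_label : String) : List (String × List (List (Int × String))) :=
  -- Python's first loop builds a dict `final` that the function never reads; ported for fidelity, unused.
  let _final : PySem.Dict String (PySem.Dict Int (List (String × String))) :=
    data.foldl (fun final pts =>
      if n ≤ (pts.2.length : Int) then
        (pts.2.foldl (fun (st : PySem.Dict Int (List (String × String)) × PySem.Dict String (PySem.Dict Int (List (String × String)))) kv =>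
          let fd := st.1.insert kv.1 kv.2
          (fd, st.2.insert pts.1 fd)) (PySem.Dict.empty, final)).2
      else final) PySem.Dict.empty
  (data.foldl (fun (snaps : PySem.Dict String (List (List (Int × String)))) pts =>
    pts.2.foldl (fun snaps tv =>
      if tv.1 < (pts.2.length : Int) - (n - 1) ∧
         (((PySem.List.pyRange 0 (n - 1) 1).map (fun y => lookL data pts.1 (tv.1 + y) label)).all
           (fun c => c != yes_label) = true)
      then
        let snaps1 := if snaps.contains pts.1 then snaps else snaps.insert pts.1 []
        snaps1.modify pts.1 [] (fun l =>
          l ++ [(PySem.List.pyRange 0 n 1).map (fun j => (tv.1 + j, lookL data pts.1 (tv.1 + j) label))])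
      else snaps) snaps) PySem.Dict.empty).items

-- ===== PORT B =====
-- ts[i][label] as B writes it (B looks snapshots up in the patient's own dict)
def lookT (ts : List (Int × List (String × String))) (i : Int) (label : String) : String :=
  PySem.Dict.getD (PySem.Dict.mk (PySem.Dict.getD (PySem.Dict.mk ts) i [])) label ""

def compute_consecutive_snapshots_n_alt (data : List (String × List (Int × List (String × String)))) (n : Int) (label : String) (yes_label : String) : List (String × List (List (Int × String))) :=
  (data.foldl (fun (snaps : PySem.Dict String (List (List (Int × String)))) pts =>
    let run : PySem.Dict Int Int :=
      (PySem.List.sorted (pts.2.map Prod.fst) (fun t => t) true).foldl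
        (fun run t => run.insert t
          (if (PySem.Dict.get? (PySem.Dict.mk (PySem.Dict.getD (PySem.Dict.mk pts.2) t [])) label) == some yes_label
           then 0 else 1 + run.getD (t + 1) 0)) PySem.Dict.empty
    let res : List (List (Int × String)) := pts.2.foldl (fun res tv =>
      if tv.1 < (pts.2.length : Int) - (n - 1) ∧ n - 1 ≤ run.getD tv.1 0
      then res ++ [(PySem.List.pyRange 0 n 1).map (fun j => (tv.1 + j, lookT pts.2 (tv.1 + j) label))]
      else res) []
    if res.isEmpty then snaps else snaps.insert pts.1 res) PySem.Dict.empty).items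

-- ===== PRECONDITION & SPEC =====
-- snapshot key i exists in ts, and the label key exists in that snapshot
def present (ts : List (Int × List (String × String))) (i : Int) (label : String) : Prop :=
  (PySem.Dict.get? (PySem.Dict.mk ts) i).isSome = true ∧
  (PySem.Dict.get? (PySem.Dict.mk (PySem.Dict.getD (PySem.Dict.mk ts) i [])) label).isSome = true

-- Pre_ states exactly that A returns: every snapshot/label lookup A performs hits an existing key
-- (otherwise Python raises KeyError); the Nodup conjuncts only rule out association lists with
-- duplicate keys, which do not arise from Python dicts.
def Pre_compute_consecutive_snapshots_n (data : List (String × List (Int × List (String × String)))) (n : Int) (label : String) (yes_label : String) : Prop :=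
  (data.map Prod.fst).Nodup ∧
  ∀ pts ∈ data, (pts.2.map Prod.fst).Nodup ∧
    ∀ td ∈ pts.2, td.1 < (pts.2.length : Int) - (n - 1) →
      (∀ y ∈ PySem.List.pyRange 0 (n - 1) 1, present pts.2 (td.1 + y) label) ∧
      ((∀ y ∈ PySem.List.pyRange 0 (n - 1) 1, lookT pts.2 (td.1 + y) label ≠ yes_label) →
        ∀ j ∈ PySem.List.pyRange 0 n 1, present pts.2 (td.1 + j) label)
instance (data : List (String × List (Int × List (String × String)))) (n : Int) (label : String) (yes_label : String) : Decidable (Pre_compute_consecutive_snapshots_n data n label yes_label) := by unfold Pre_compute_consecutive_snapshots_n present; infer_instance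

def pvWitness_compute_consecutive_snapshots_n : (List (String × List (Int × List (String × String)))) × Int × String × String :=
  ([("p1", [(0, [("lab", "N")]), (1, [("lab", "Y")]), (2, [("lab", "N")])]), ("p2", [(0, [("lab", "N")])])], 2, "lab", "Y")

def Spec_compute_consecutive_snapshots_n (data : List (String × List (Int × List (String × String)))) (n : Int) (label : String) (yes_label : String) (out : List (String × List (List (Int × String)))) : Prop := out = compute_consecutive_snapshots_n_alt data n label yes_label
instance (data : List (String × List (Int × List (String × String)))) (n : Int) (label : String) (yes_label : String) (out : List (String × List (List (Int × String)))) : Decidable (Spec_compute_consecutive_snapshots_n data n label yes_label out) := by unfold Spec_compute_consecutive_snapshots_n; infer_instance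

-- ===== CLAIM (what is proved, stated in full; the proofs are below) =====
def Claim_equal_compute_consecutive_snapshots_n : Prop := ∀ (data : List (String × List (Int × List (String × String)))) (n : Int) (label : String) (yes_label : String), Dom_compute_consecutive_snapshots_n data n label yes_label → Pre_compute_consecutive_snapshots_n data n label yes_label → Spec_compute_consecutive_snapshots_n data n label yes_label (compute_consecutive_snapshots_n data n label yes_label)

-- ===== LEMMAS AND PROOFS =====

-- "the label of snapshot t is not yes_label (a missing key counts as good)", as B's run pass tests it
def okT (ts : List (Int × List (String × String))) (label yes_label : String) (t : Int) : Bool :=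
  !((PySem.Dict.get? (PySem.Dict.mk (PySem.Dict.getD (PySem.Dict.mk ts) t [])) label) == some yes_label)

-- the length of the chain of consecutive good keys starting at t (the value B's run dict stores)
def chain (ts : List (Int × List (String × String))) (label yes_label : String) (t : Int) : Int :=
  if okT ts label yes_label t = false then 0
  else 1 + (if h : (t + 1) ∈ ts.map Prod.fst then chain ts label yes_label (t + 1) else 0)
termination_by ((ts.map Prod.fst).toFinset.filter (fun s => t < s)).card
decreasing_by
  apply Finset.card_lt_card
  constructor
  · intro s hs
    simp only [Finset.mem_filter] at *
    exact ⟨hs.1, by omega⟩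
  · intro hsub
    have h1 : (t + 1) ∈ (ts.map Prod.fst).toFinset.filter (fun s => t < s) := by
      simp only [Finset.mem_filter, List.mem_toFinset]
      exact ⟨h, by omega⟩
    have h2 := hsub h1
    simp only [Finset.mem_filter] at h2
    omega

def runStep (ts : List (Int × List (String × String))) (label yes_label : String)
    (run : PySem.Dict Int Int) (t : Int) : PySem.Dict Int Int :=
  run.insert t
    (if (PySem.Dict.get? (PySem.Dict.mk (PySem.Dict.getD (PySem.Dict.mk ts) t [])) label) == some yes_label
     then 0 else 1 + run.getD (t + 1) 0)

def runOf (ts : List (Int × List (String × String))) (label yes_label : String) : PySem.Dict Int Int :=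
  (PySem.List.sorted (ts.map Prod.fst) (fun t => t) true).foldl (runStep ts label yes_label) PySem.Dict.empty

-- the two per-snapshot loop bodies
def gA (data : List (String × List (Int × List (String × String)))) (n : Int) (label yes_label p : String)
    (ts : List (Int × List (String × String)))
    (snaps : PySem.Dict String (List (List (Int × String)))) (tv : Int × List (String × String)) : PySem.Dict String (List (List (Int × String))) :=
  if tv.1 < (ts.length : Int) - (n - 1) ∧
     (((PySem.List.pyRange 0 (n - 1) 1).map (fun y => lookL data p (tv.1 + y) label)).all
       (fun c => c != yes_label) = true)
  then (if snaps.contains p then snaps else snaps.insert p []).modify p []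
         (fun l => l ++ [(PySem.List.pyRange 0 n 1).map (fun j => (tv.1 + j, lookL data p (tv.1 + j) label))])
  else snaps

def gB (n : Int) (label yes_label : String) (ts : List (Int × List (String × String)))
    (res : List (List (Int × String))) (tv : Int × List (String × String)) : List (List (Int × String)) :=
  if tv.1 < (ts.length : Int) - (n - 1) ∧ n - 1 ≤ (runOf ts label yes_label).getD tv.1 0
  then res ++ [(PySem.List.pyRange 0 n 1).map (fun j => (tv.1 + j, lookT ts (tv.1 + j) label))]
  else res

def resB (n : Int) (label yes_label : String) (ts : List (Int × List (String × String))) : List (List (Int × String)) :=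
  ts.foldl (gB n label yes_label ts) []

theorem chain_nonneg (ts : List (Int × List (String × String))) (label yes_label : String) (t : Int) :
    0 ≤ chain ts label yes_label t := by
  fun_induction chain ts label yes_label t with
  | case1 => omega
  | case2 t h ih =>
    split
    · rename_i hm; have := ih hm; omega
    · omega

theorem run_loop (ts : List (Int × List (String × String))) (label yes_label : String) :
    ∀ (L : List Int) (run0 : PySem.Dict Int Int),
      L.Pairwise (· > ·) → (∀ s ∈ L, s ∈ ts.map Prod.fst) →
      (∀ s', run0.contains s' = true → s' ∈ ts.map Prod.fst ∧ run0.getD s' 0 = chain ts label yes_label s') →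
      (∀ s ∈ ts.map Prod.fst, run0.contains s = true ∨ s ∈ L) →
      (∀ s', (L.foldl (runStep ts label yes_label) run0).contains s' = true →
          s' ∈ ts.map Prod.fst ∧ (L.foldl (runStep ts label yes_label) run0).getD s' 0 = chain ts label yes_label s') ∧
      (∀ s ∈ ts.map Prod.fst, (L.foldl (runStep ts label yes_label) run0).contains s = true) := by
  intro L
  induction L with
  | nil =>
    intro run0 _ _ h3 h4
    refine ⟨h3, fun s hs => ?_⟩
    rcases h4 s hs with h | h
    · exact h
    · simp at h
  | cons t L ih =>
    intro run0 hpair hsub h3 h4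
    simp only [List.foldl_cons]
    have htmem : t ∈ ts.map Prod.fst := hsub t List.mem_cons_self
    have hval : (if (PySem.Dict.get? (PySem.Dict.mk (PySem.Dict.getD (PySem.Dict.mk ts) t [])) label) == some yes_label
        then (0:Int) else 1 + run0.getD (t + 1) 0) = chain ts label yes_label t := by
      rw [chain]
      by_cases hok : okT ts label yes_label t = false
      · have : ((PySem.Dict.get? (PySem.Dict.mk (PySem.Dict.getD (PySem.Dict.mk ts) t [])) label) == some yes_label) = true := by
          simpa [okT] using hok
        rw [if_pos this, if_pos hok]
      · have hok' : ((PySem.Dict.get? (PySem.Dict.mk (PySem.Dict.getD (PySem.Dict.mk ts) t [])) label) == some yes_label) = false := by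
          simp only [okT] at hok
          simpa using hok
        rw [if_neg (by simp [hok']), if_neg hok]
        congr 1
        by_cases hmem : (t + 1) ∈ ts.map Prod.fst
        · rw [dif_pos hmem]
          rcases h4 (t + 1) hmem with hc | hin
          · exact (h3 (t + 1) hc).2
          · exfalso
            rcases List.mem_cons.1 hin with he | hin
            · omega
            · have := (List.pairwise_cons.1 hpair).1 (t + 1) hin
              omega
        · rw [dif_neg hmem]
          by_cases hc : run0.contains (t + 1) = true
          · exact absurd (h3 _ hc).1 hmem
          · rw [PySem.Dict.getD_of_not_contains _ _ (by simpa using hc)]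
    apply ih
    · exact (List.pairwise_cons.1 hpair).2
    · exact fun s hs => hsub s (List.mem_cons_of_mem _ hs)
    · intro s' hc
      rw [runStep] at hc ⊢
      by_cases he : s' = t
      · subst he
        refine ⟨htmem, ?_⟩
        rw [PySem.Dict.getD_insert_self, hval]
      · rw [PySem.Dict.contains_insert] at hc
        have hc' : run0.contains s' = true := by
          rcases Bool.or_eq_true_iff.1 hc with h | h
          · exact absurd (by simpa using h) he
          · exact h
        refine ⟨(h3 s' hc').1, ?_⟩
        rw [PySem.Dict.getD_insert_of_ne _ _ _ he, (h3 s' hc').2]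
    · intro s hs
      rcases h4 s hs with hc | hin
      · left
        rw [runStep, PySem.Dict.contains_insert, hc]
        simp
      · rcases List.mem_cons.1 hin with he | hin
        · left
          subst he
          rw [runStep]
          exact PySem.Dict.contains_insert_self _ _ _
        · right; exact hin

theorem run_spec (ts : List (Int × List (String × String))) (label yes_label : String)
    (hnod : (ts.map Prod.fst).Nodup) (t : Int) (ht : t ∈ ts.map Prod.fst) :
    (runOf ts label yes_label).getD t 0 = chain ts label yes_label t := by
  have hperm := PySem.List.sorted_perm (ts.map Prod.fst) (fun t => t) true
  have hpair : (PySem.List.sorted (ts.map Prod.fst) (fun t => t) true).Pairwise (· > ·) := by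
    have h1 := PySem.List.sorted_pairwise_rev (ts.map Prod.fst) (fun t => t)
    have h2 : (PySem.List.sorted (ts.map Prod.fst) (fun t => t) true).Nodup := hperm.nodup_iff.2 hnod
    exact (h1.and h2).imp (fun {a b} hab => by
      have := hab.1; have := hab.2; omega)
  have := run_loop ts label yes_label (PySem.List.sorted (ts.map Prod.fst) (fun t => t) true) PySem.Dict.empty
    hpair (fun s hs => hperm.mem_iff.1 hs)
    (fun s' hc => by rw [PySem.Dict.contains_empty] at hc; exact absurd hc (by simp))
    (fun s hs => Or.inr (hperm.mem_iff.2 hs))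
  exact (this.1 t (this.2 t ht)).2

theorem chain_ge (ts : List (Int × List (String × String))) (label yes_label : String) (m : Nat) :
    ∀ (t : Int), ((m : Int) ≤ chain ts label yes_label t) ↔
      (∀ y : Nat, y < m → (okT ts label yes_label (t + y) = true ∧ (1 ≤ y → (t + (y : Int)) ∈ ts.map Prod.fst))) := by
  induction m with
  | zero =>
    intro t
    simp only [Nat.cast_zero]
    exact ⟨fun _ y hy => absurd hy (by omega), fun _ => chain_nonneg ts label yes_label t⟩
  | succ m ih =>
    intro t
    rw [chain]
    by_cases hok : okT ts label yes_label t = false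
    · rw [if_pos hok]
      constructor
      · intro h; exfalso; push_cast at h; omega
      · intro h
        exfalso
        have := (h 0 (by omega)).1
        simp only [Nat.cast_zero, add_zero] at this
        rw [this] at hok
        exact absurd hok (by simp)
    · rw [if_neg hok]
      have hokt : okT ts label yes_label t = true := by
        revert hok; cases okT ts label yes_label t <;> simp
      by_cases hmem : (t + 1) ∈ ts.map Prod.fst
      · rw [dif_pos hmem]
        have hiff : ((m : Int) ≤ chain ts label yes_label (t + 1)) ↔ _ := ih (t + 1)
        constructor
        · intro h y hy
          have hc : (m : Int) ≤ chain ts label yes_label (t + 1) := by push_cast at h ⊢; omega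
          have hr := hiff.1 hc
          rcases Nat.eq_zero_or_pos y with hy0 | hy1
          · subst hy0
            exact ⟨by simpa using hokt, fun h1 => absurd h1 (by omega)⟩
          · obtain ⟨y', rfl⟩ : ∃ y', y = y' + 1 := ⟨y - 1, by omega⟩
            have hr' := hr y' (by omega)
            constructor
            · have := hr'.1
              rwa [show t + 1 + (y' : Int) = t + ((y' : Nat) + 1 : Nat) from by push_cast; ring] at this
            · intro _
              rcases Nat.eq_zero_or_pos y' with hz | hp
              · subst hz; simpa using hmem
              · have := hr'.2 (by omega)
                rwa [show t + 1 + (y' : Int) = t + ((y' : Nat) + 1 : Nat) from by push_cast; ring] at this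
        · intro h
          have : (m : Int) ≤ chain ts label yes_label (t + 1) := by
            apply hiff.2
            intro y' hy'
            have hr' := h (y' + 1) (by omega)
            constructor
            · have := hr'.1
              rwa [show t + ((y' + 1 : Nat) : Int) = t + 1 + (y' : Int) from by push_cast; ring] at this
            · intro _
              have := hr'.2 (by omega)
              rwa [show t + ((y' + 1 : Nat) : Int) = t + 1 + (y' : Int) from by push_cast; ring] at this
          push_cast
          omega
      · rw [dif_neg hmem]
        constructor
        · intro h y hy
          have hm0 : m = 0 := by push_cast at h; omega
          have hy0 : y = 0 := by omega
          subst hy0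
          exact ⟨by simpa using hokt, fun h1 => absurd h1 (by omega)⟩
        · intro h
          rcases Nat.eq_zero_or_pos m with hm0 | hm1
          · subst hm0; simp
          · exfalso
            have := (h 1 (by omega)).2 (by omega)
            simp only [Nat.cast_one] at this
            exact hmem this

theorem lookL_eq_lookT (data : List (String × List (Int × List (String × String)))) (p : String)
    (ts : List (Int × List (String × String))) (label : String)
    (hnd : (data.map Prod.fst).Nodup) (hmem : (p, ts) ∈ data) (i : Int) :
    lookL data p i label = lookT ts i label := by
  have hdata : (PySem.Dict.mk data).getD p [] = ts := by
    apply PySem.Dict.getD_of_mem_items (d := PySem.Dict.mk data) (k := p) (v := ts) hmem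
    simpa [PySem.Dict.keys] using hnd
  rw [lookL, lookT, hdata]

theorem present_mem (ts : List (Int × List (String × String))) (label : String) (i : Int)
    (h : present ts i label) : i ∈ ts.map Prod.fst := by
  have h1 := h.1
  rw [← PySem.Dict.contains_eq_isSome_get?, PySem.Dict.contains_iff_mem_keys] at h1
  simpa [PySem.Dict.keys] using h1

theorem present_ok (ts : List (Int × List (String × String))) (label yes_label : String) (i : Int)
    (h : present ts i label) :
    (okT ts label yes_label i = true) ↔ lookT ts i label ≠ yes_label := by
  obtain ⟨v, hv⟩ := Option.isSome_iff_exists.1 h.2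
  simp only [PySem.Dict.getD_eq_get?_getD] at hv
  simp only [okT, lookT, PySem.Dict.getD_eq_get?_getD, hv]
  simp

theorem cond_iff (data : List (String × List (Int × List (String × String)))) (p : String)
    (ts : List (Int × List (String × String))) (n : Int) (label yes_label : String)
    (hnd : (data.map Prod.fst).Nodup) (hmem : (p, ts) ∈ data)
    (hnodts : (ts.map Prod.fst).Nodup)
    (t : Int) (htmem : t ∈ ts.map Prod.fst)
    (hpres : ∀ y ∈ PySem.List.pyRange 0 (n - 1) 1, present ts (t + y) label) :
    (((PySem.List.pyRange 0 (n - 1) 1).map (fun y => lookL data p (t + y) label)).all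
      (fun c => c != yes_label) = true)
    ↔ n - 1 ≤ (runOf ts label yes_label).getD t 0 := by
  rw [run_spec ts label yes_label hnodts t htmem]
  rw [List.all_eq_true]
  by_cases hn : n - 1 ≤ 0
  · constructor
    · intro _
      have := chain_nonneg ts label yes_label t
      omega
    · intro _ x hx
      rw [PySem.List.pyRange_one_eq_nil hn] at hx
      simp at hx
  · have hm : ((n - 1).toNat : Int) = n - 1 := by omega
    have hch := chain_ge ts label yes_label (n - 1).toNat t
    rw [hm] at hch
    rw [hch]
    constructor
    · intro h y hy
      have hyR : ((y : Int) ∈ PySem.List.pyRange 0 (n - 1) 1) := by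
        rw [PySem.List.mem_pyRange_one]; omega
      have hp := hpres _ hyR
      constructor
      · rw [present_ok ts label yes_label _ hp]
        have := h _ (List.mem_map_of_mem hyR)
        rw [lookL_eq_lookT data p ts label hnd hmem] at this
        simpa using this
      · intro _
        exact present_mem ts label _ hp
    · intro h x hx
      obtain ⟨y, hy, rfl⟩ := List.mem_map.1 hx
      rw [PySem.List.mem_pyRange_one] at hy
      have hp := hpres _ (by rw [PySem.List.mem_pyRange_one]; omega)
      have hok := (h y.toNat (by omega)).1
      rw [show ((y.toNat : Nat) : Int) = y from by omega] at hok
      rw [present_ok ts label yes_label _ hp] at hok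
      rw [lookL_eq_lookT data p ts label hnd hmem]
      simpa using hok

theorem insert_insert_fresh {κ ν : Type} [BEq κ] [LawfulBEq κ] (d : PySem.Dict κ ν) (k : κ)
    (h : d.contains k = false) (v v' : ν) : (d.insert k v).insert k v' = d.insert k v' := by
  have hmem : ∀ p ∈ d.items, (p.1 == k) = false := by
    intro p hp
    by_contra hc
    simp [PySem.Dict.contains] at h
    exact absurd (h p.1 p.2 hp) (by simpa using hc)
  have hc2 : (d.insert k v).contains k = true := PySem.Dict.contains_insert_self _ _ _
  apply PySem.Dict.ext
  rw [PySem.Dict.items_insert_of_contains _ _ hc2,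
      PySem.Dict.items_insert_of_not_contains _ _ h,
      PySem.Dict.items_insert_of_not_contains _ _ h]
  rw [List.map_append]
  simp only [List.map_cons, List.map_nil, BEq.refl, if_pos]
  congr 1
  conv_rhs => rw [← List.map_id d.items]
  exact List.map_congr_left (fun p hp => by simp [hmem p hp])

-- A's inner loop, over any element list, against B's result accumulator
theorem loop_eq {ι : Type} (p : String) (wA wB : ι → List (Int × String)) (cA cB : ι → Prop)
    [DecidablePred cA] [DecidablePred cB] (L : List ι)
    (hc : ∀ k ∈ L, (cA k ↔ cB k) ∧ (cA k → wA k = wB k)) :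
    ∀ (snaps : PySem.Dict String (List (List (Int × String)))) (acc : List (List (Int × String))),
      snaps.contains p = false →
    L.foldl (fun s k =>
        if cA k then
          (let s1 := if s.contains p then s else s.insert p []
           s1.modify p [] (fun l => l ++ [wA k]))
        else s) (if acc = [] then snaps else snaps.insert p acc)
    = (if (L.foldl (fun a k => if cB k then a ++ [wB k] else a) acc) = [] then snaps
       else snaps.insert p (L.foldl (fun a k => if cB k then a ++ [wB k] else a) acc)) := by
  induction L with
  | nil => intro snaps acc hp; rfl
  | cons k L ih =>
    intro snaps acc hp
    have hck := hc k (List.mem_cons_self)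
    have hctail : ∀ k' ∈ L, (cA k' ↔ cB k') ∧ (cA k' → wA k' = wB k') :=
      fun k' hk' => hc k' (List.mem_cons_of_mem _ hk')
    simp only [List.foldl_cons]
    by_cases hcB : cB k
    · have hcA : cA k := hck.1.2 hcB
      have hw : wA k = wB k := hck.2 hcA
      rw [if_pos hcA, if_pos hcB, hw]
      have hstep : (let s1 := if (if acc = [] then snaps else snaps.insert p acc).contains p
                      then (if acc = [] then snaps else snaps.insert p acc)
                      else (if acc = [] then snaps else snaps.insert p acc).insert p []
                    s1.modify p [] (fun l => l ++ [wB k]))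
          = (if (acc ++ [wB k]) = [] then snaps else snaps.insert p (acc ++ [wB k])) := by
        rw [if_neg (by simp : ¬ (acc ++ [wB k]) = [])]
        by_cases hacc : acc = []
        · subst hacc
          simp only [if_true, hp, Bool.false_eq_true, if_false]
          show ((snaps.insert p []).modify p [] (fun l => l ++ [wB k])) = snaps.insert p ([] ++ [wB k])
          rw [PySem.Dict.modify, PySem.Dict.getD_insert_self]
          exact insert_insert_fresh snaps p hp _ _
        · rw [if_neg hacc]
          have hcont : (snaps.insert p acc).contains p = true := PySem.Dict.contains_insert_self _ _ _
          simp only [hcont, if_pos]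
          show ((snaps.insert p acc).modify p [] (fun l => l ++ [wB k])) = snaps.insert p (acc ++ [wB k])
          rw [PySem.Dict.modify, PySem.Dict.getD_insert_self]
          exact insert_insert_fresh snaps p hp _ _
      rw [hstep]
      exact ih hctail snaps (acc ++ [wB k]) hp
    · rw [if_neg (fun h => hcB (hck.1.1 h)), if_neg hcB]
      exact ih hctail snaps acc hp

theorem patient_eq (data : List (String × List (Int × List (String × String)))) (n : Int)
    (label yes_label p : String) (ts : List (Int × List (String × String)))
    (hnd : (data.map Prod.fst).Nodup) (hmem : (p, ts) ∈ data)
    (hnodts : (ts.map Prod.fst).Nodup)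
    (hpres : ∀ td ∈ ts, td.1 < (ts.length : Int) - (n - 1) →
      ∀ y ∈ PySem.List.pyRange 0 (n - 1) 1, present ts (td.1 + y) label)
    (s : PySem.Dict String (List (List (Int × String)))) (hp : s.contains p = false) :
    ts.foldl (gA data n label yes_label p ts) s
      = (if resB n label yes_label ts = [] then s else s.insert p (resB n label yes_label ts)) := by
  have := loop_eq p
      (fun tv : Int × List (String × String) => (PySem.List.pyRange 0 n 1).map (fun j => (tv.1 + j, lookL data p (tv.1 + j) label)))
      (fun tv => (PySem.List.pyRange 0 n 1).map (fun j => (tv.1 + j, lookT ts (tv.1 + j) label)))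
      (fun tv => tv.1 < (ts.length : Int) - (n - 1) ∧
        (((PySem.List.pyRange 0 (n - 1) 1).map (fun y => lookL data p (tv.1 + y) label)).all
          (fun c => c != yes_label) = true))
      (fun tv => tv.1 < (ts.length : Int) - (n - 1) ∧ n - 1 ≤ (runOf ts label yes_label).getD tv.1 0)
      ts ?_ s [] hp
  · simpa only [if_pos rfl] using this
  · intro tv htv
    constructor
    · exact and_congr_right (fun hlt =>
        cond_iff data p ts n label yes_label hnd hmem hnodts tv.1
          (List.mem_map_of_mem htv) (hpres tv htv hlt))
    · intro _
      apply List.map_congr_left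
      intro j _
      rw [lookL_eq_lookT data p ts label hnd hmem]

theorem outer_eq (data : List (String × List (Int × List (String × String)))) (n : Int)
    (label yes_label : String) (hnd : (data.map Prod.fst).Nodup)
    (hpatAll : ∀ pts ∈ data, (pts.2.map Prod.fst).Nodup ∧
      ∀ td ∈ pts.2, td.1 < (pts.2.length : Int) - (n - 1) →
        ∀ y ∈ PySem.List.pyRange 0 (n - 1) 1, present pts.2 (td.1 + y) label) :
    ∀ (l : List (String × List (Int × List (String × String)))) (s : PySem.Dict String (List (List (Int × String)))),
      (∀ pts ∈ l, pts ∈ data) → (l.map Prod.fst).Nodup → (∀ pts ∈ l, s.contains pts.1 = false) →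
    l.foldl (fun s pts => pts.2.foldl (gA data n label yes_label pts.1 pts.2) s) s
      = l.foldl (fun s pts => if (resB n label yes_label pts.2).isEmpty then s else s.insert pts.1 (resB n label yes_label pts.2)) s := by
  intro l
  induction l with
  | nil => intro s _ _ _; rfl
  | cons pts l ih =>
    intro s hsub hnod hcont
    simp only [List.foldl_cons]
    have hmem : (pts.1, pts.2) ∈ data := by
      have := hsub pts List.mem_cons_self
      simpa using this
    have hpat := hpatAll pts (hsub pts List.mem_cons_self)
    have hstep := patient_eq data n label yes_label pts.1 pts.2 hnd hmem hpat.1 hpat.2 s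
      (hcont pts List.mem_cons_self)
    rw [hstep]
    have halign : (if resB n label yes_label pts.2 = [] then s else s.insert pts.1 (resB n label yes_label pts.2))
        = (if (resB n label yes_label pts.2).isEmpty then s else s.insert pts.1 (resB n label yes_label pts.2)) := by
      by_cases hres : resB n label yes_label pts.2 = [] <;> simp [hres]
    rw [halign]
    apply ih _ (fun q hq => hsub q (List.mem_cons_of_mem _ hq)) (by simpa using hnod.of_cons)
    intro q hq
    by_cases hres : (resB n label yes_label pts.2).isEmpty
    · rw [if_pos hres]
      exact hcont q (List.mem_cons_of_mem _ hq)
    · rw [if_neg hres, PySem.Dict.contains_insert]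
      have hne : q.1 ≠ pts.1 := by
        intro he
        have : pts.1 ∈ l.map Prod.fst := he ▸ List.mem_map_of_mem hq
        simp only [List.map_cons, List.nodup_cons] at hnod
        exact hnod.1 this
      simp [hne, hcont q (List.mem_cons_of_mem _ hq)]

-- ===== VERDICT (by name: the statement is the Claim_ definition above) =====
theorem compute_consecutive_snapshots_n_spec : Claim_equal_compute_consecutive_snapshots_n := by
  intro data n label yes_label _hdom hpre
  obtain ⟨hnd, hpts⟩ := hpre
  unfold Spec_compute_consecutive_snapshots_n
  show (data.foldl (fun s pts => pts.2.foldl (gA data n label yes_label pts.1 pts.2) s) PySem.Dict.empty).items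
      = (data.foldl (fun s pts => if (resB n label yes_label pts.2).isEmpty then s else s.insert pts.1 (resB n label yes_label pts.2)) PySem.Dict.empty).items
  congr 1
  exact outer_eq data n label yes_label hnd
    (fun pts h => ⟨(hpts pts h).1, fun td htd hlt => ((hpts pts h).2 td htd hlt).1⟩)
    data PySem.Dict.empty (fun _ h => h) hnd (fun q _ => PySem.Dict.contains_empty q.1)
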